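-- pv_equiv track=rewrite | github.com/maripedg/ai-assistant-v2 | backend/ingest/chunking/structured_docx_chunker.py | _find_repeated_lines
-- ===== SOURCE A (Python) =====
-- from collections import Counter
-- from typing import Dict, List, Optional, Sequence
--
-- def _normalize_block_lines(block: str) -> List[str]:
--     return [ln.rstrip() for ln in block.splitlines() if ln.strip()]
--
-- def _find_repeated_lines(items: Sequence[Dict]) -> set[str]:
--     counts: Counter[str] = Counter()
--     for it in items:
--         for ln in _normalize_block_lines(it.get("text", "")):
--             if 1 <= len(ln) <= 120:
--                 counts[ln] += 1
--     if not counts: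
--         return set()
--     threshold = max(2, int(len(items) * 0.5))
--     return {ln for ln, c in counts.items() if c >= threshold}
-- ===== SOURCE B (Python) =====
-- def _find_repeated_lines(items):
--     lines = []
--     for it in items:
--         for raw in it.get("text", "").splitlines():
--             if raw.strip() and 1 <= len(raw.rstrip()) <= 120:
--                 lines.append(raw.rstrip())
--     threshold = max(2, int(len(items) * 0.5))
--     counts = {}
--     prev = None
--     run = 0
--     for ln in sorted(lines):
--         if ln == prev:
--             run += 1
--         else:
--             if prev is not None:
--                 counts[prev] = run
--             prev = ln
--             run = 1
--     if prev is not None: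
--         counts[prev] = run
--     return {ln for ln in lines if counts[ln] >= threshold}
-- ===== Notes on version B (the rewrite author's own statement) =====
-- stated objective: alternative
-- what changed: Replaces A's Counter hash-accumulation and dict-items filtering by a sort-based algorithm: collect all qualifying normalized lines into one flat list, sort it, compute each line's frequency by a single run-length scan over the sorted list, then select lines meeting the threshold.
import Mathlib
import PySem

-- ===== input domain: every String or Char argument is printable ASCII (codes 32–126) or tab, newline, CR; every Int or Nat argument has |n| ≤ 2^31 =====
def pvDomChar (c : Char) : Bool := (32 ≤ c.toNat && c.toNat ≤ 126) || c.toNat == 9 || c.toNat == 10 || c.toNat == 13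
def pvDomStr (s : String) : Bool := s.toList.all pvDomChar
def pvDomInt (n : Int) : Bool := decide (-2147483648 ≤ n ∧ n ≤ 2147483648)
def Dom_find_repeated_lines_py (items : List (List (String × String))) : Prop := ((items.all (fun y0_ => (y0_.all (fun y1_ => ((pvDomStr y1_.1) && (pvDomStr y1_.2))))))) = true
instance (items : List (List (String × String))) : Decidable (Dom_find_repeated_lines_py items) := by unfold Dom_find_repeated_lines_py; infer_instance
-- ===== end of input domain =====

-- B replaces A's Counter accumulation by a sort-based algorithm: one flat list of all
-- qualifying normalized lines, sorted, frequencies read off by a run-length scan.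

-- ===== PORT A =====
def normalize_block_lines_py (block : String) : List String :=
  ((PySem.Str.splitlines block).filter (fun ln => !(PySem.Str.strip ln == ""))).map
    (fun ln => PySem.Str.rstrip ln)

def find_repeated_lines_py (items : List (List (String × String))) : List String :=
  let counts : PySem.Dict String Int :=
    items.foldl (fun counts it =>
      (normalize_block_lines_py (PySem.Dict.getD (PySem.Dict.ofList it) "text" "")).foldl
        (fun counts ln =>
          if 1 ≤ PySem.Str.len ln ∧ PySem.Str.len ln ≤ 120 then
            counts.modify ln 0 (· + 1)
          else counts)
        counts)
      PySem.Dict.empty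
  if counts.items = [] then []
  else
    -- int(len(items) * 0.5) = ⌊len(items)/2⌋ exactly (n · 0.5 is exact in binary floating point)
    let threshold : Int := max 2 ((items.length : Int) / 2)
    PySem.Set.ofList ((counts.items.filter (fun p => threshold ≤ p.2)).map (fun p => p.1))

-- ===== PORT B =====
-- B's loop body over sorted(lines): state (counts, prev, run); 'ln == prev' with prev
-- initially None is 'st.2.1 = some ln' (str == None is False in Python)
def pvStep (st : PySem.Dict String Int × Option String × Int) (ln : String) :
    PySem.Dict String Int × Option String × Int :=
  if st.2.1 = some ln then (st.1, st.2.1, st.2.2 + 1)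
  else
    ((match st.2.1 with
      | some p => st.1.insert p st.2.2
      | none => st.1), some ln, 1)

-- B's trailing 'if prev is not None: counts[prev] = run'
def pvFlush (st : PySem.Dict String Int × Option String × Int) : PySem.Dict String Int :=
  match st.2.1 with
  | some p => st.1.insert p st.2.2
  | none => st.1

def find_repeated_lines_py_alt (items : List (List (String × String))) : List String :=
  let lines : List String :=
    items.foldl (fun acc it =>
      (PySem.Str.splitlines (PySem.Dict.getD (PySem.Dict.ofList it) "text" "")).foldl
        (fun acc raw =>
          if PySem.Str.strip raw ≠ "" ∧
              1 ≤ PySem.Str.len (PySem.Str.rstrip raw) ∧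
              PySem.Str.len (PySem.Str.rstrip raw) ≤ 120 then
            acc ++ [PySem.Str.rstrip raw]
          else acc)
        acc)
      []
  -- int(len(items) * 0.5) = ⌊len(items)/2⌋ exactly (n · 0.5 is exact in binary floating point)
  let threshold : Int := max 2 ((items.length : Int) / 2)
  let counts : PySem.Dict String Int :=
    pvFlush ((PySem.List.sorted lines (fun x => x) false).foldl pvStep
      (PySem.Dict.empty, none, 0))
  -- counts[ln]: the key is always present (ln occurs in sorted(lines)), so getD is exact here
  PySem.Set.ofList (lines.filter (fun ln => threshold ≤ counts.getD ln 0))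

-- ===== PRECONDITION & SPEC =====
def Spec_find_repeated_lines_py (items : List (List (String × String))) (out : List String) : Prop := out = find_repeated_lines_py_alt items
instance (items : List (List (String × String))) (out : List String) : Decidable (Spec_find_repeated_lines_py items out) := by unfold Spec_find_repeated_lines_py; infer_instance

-- ===== CLAIM (what is proved, stated in full; the proofs are below) =====
def Claim_equal_find_repeated_lines_py : Prop := ∀ (items : List (List (String × String))), Dom_find_repeated_lines_py items → Spec_find_repeated_lines_py items (find_repeated_lines_py items)

-- ===== LEMMAS AND PROOFS =====

-- the qualifying normalized lines of a list of raw lines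
def pvGood (rs : List String) : List String :=
  ((rs.filter (fun ln => !(PySem.Str.strip ln == ""))).map
      (fun ln => PySem.Str.rstrip ln)).filter
    (fun ln => decide (1 ≤ PySem.Str.len ln ∧ PySem.Str.len ln ≤ 120))

-- the flat list of all qualifying lines of all blocks
def pvL (items : List (List (String × String))) : List String :=
  items.flatMap (fun it =>
    pvGood (PySem.Str.splitlines (PySem.Dict.getD (PySem.Dict.ofList it) "text" "")))

-- A's nested counting loop is the Counter of the flat line list
lemma pvCountsA (items : List (List (String × String))) (d : PySem.Dict String Int) :
    items.foldl (fun counts it =>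
      (normalize_block_lines_py (PySem.Dict.getD (PySem.Dict.ofList it) "text" "")).foldl
        (fun counts ln =>
          if 1 ≤ PySem.Str.len ln ∧ PySem.Str.len ln ≤ 120 then
            counts.modify ln 0 (· + 1)
          else counts)
        counts) d
    = (pvL items).foldl (fun counts ln => counts.modify ln 0 (· + 1)) d := by
  induction items generalizing d with
  | nil => rfl
  | cons it rest ih =>
      simp only [List.foldl_cons, pvL, List.flatMap_cons, List.foldl_append]
      rw [PySem.List.foldl_ite_eq_foldl_filter, ih]
      rfl

-- B's single-pass filter condition collects exactly the qualifying normalized lines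
lemma pvFilterMap (rs : List String) :
    (rs.filter (fun raw => decide (PySem.Str.strip raw ≠ "" ∧
        1 ≤ PySem.Str.len (PySem.Str.rstrip raw) ∧
        PySem.Str.len (PySem.Str.rstrip raw) ≤ 120))).map (fun raw => PySem.Str.rstrip raw)
    = pvGood (rs := rs) := by
  unfold pvGood
  rw [List.filter_map, List.filter_filter]
  refine congrArg (List.map fun raw => PySem.Str.rstrip raw) (List.filter_congr ?_)
  intro r _
  simp only [Function.comp_apply, Bool.decide_and, decide_not]
  rw [Bool.and_comm]
  congr 1

-- B's nested collecting loop is the flat line list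
lemma pvLinesB (items : List (List (String × String))) (acc : List String) :
    items.foldl (fun acc it =>
      (PySem.Str.splitlines (PySem.Dict.getD (PySem.Dict.ofList it) "text" "")).foldl
        (fun acc raw =>
          if PySem.Str.strip raw ≠ "" ∧
              1 ≤ PySem.Str.len (PySem.Str.rstrip raw) ∧
              PySem.Str.len (PySem.Str.rstrip raw) ≤ 120 then
            acc ++ [PySem.Str.rstrip raw]
          else acc)
        acc) acc
    = acc ++ pvL items := by
  induction items generalizing acc with
  | nil => simp [pvL]
  | cons it rest ih =>
      simp only [List.foldl_cons, pvL, List.flatMap_cons]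
      rw [PySem.List.foldl_append_ite, pvFilterMap, ih]
      simp [pvL, List.append_assoc]

-- first-occurrence dedup commutes with filter
lemma pvOfList_filter (q : String → Bool) (L : List String) :
    PySem.Set.ofList (L.filter q) = (PySem.Set.ofList L).filter q := by
  induction L using List.reverseRecOn with
  | nil => rfl
  | append_singleton L x ih =>
      rw [List.filter_append, PySem.Set.ofList_append_singleton]
      by_cases hq : q x = true
      · simp only [List.filter_cons, hq, if_true, List.filter_nil,
          PySem.Set.ofList_append_singleton, PySem.Set.add_eq_ite, ih]
        by_cases hm : x ∈ PySem.Set.ofList L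
        · have hmf : x ∈ (PySem.Set.ofList L).filter q := List.mem_filter.mpr ⟨hm, hq⟩
          simp [hm, hmf]
        · have hmf : x ∉ (PySem.Set.ofList L).filter q := fun h => hm (List.mem_filter.mp h).1
          simp [hm, hmf, List.filter_append, hq]
      · simp only [Bool.not_eq_true] at hq
        simp only [List.filter_cons, hq, Bool.false_eq_true, if_false, List.filter_nil,
          List.append_nil, PySem.Set.add_eq_ite, ih]
        by_cases hm : x ∈ PySem.Set.ofList L
        · simp [hm]
        · simp [hm, List.filter_append, hq]

-- the flat list is empty iff its dedup is empty
lemma pvOfList_eq_nil_iff (L : List String) : PySem.Set.ofList L = [] ↔ L = [] := by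
  cases L with
  | nil => simp
  | cons x xs =>
      constructor
      · intro h
        exact absurd h (by rw [PySem.Set.ofList_cons]; exact List.cons_ne_nil _ _)
      · intro h; cases h

-- flushing the state reads the pending run, else the dict
lemma pvFlush_getD (d : PySem.Dict String Int) (prev : Option String) (r : Int) (k : String) :
    (pvFlush (d, prev, r)).getD k 0 = if prev = some k then r else d.getD k 0 := by
  cases prev with
  | none => simp [pvFlush]
  | some p =>
      simp only [pvFlush]
      rw [PySem.Dict.getD_insert]
      by_cases hk : k = p
      · subst hk; simp
      · rw [if_neg hk, if_neg (by simpa using Ne.symm hk)]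

-- a run of equal elements only increments the run counter
lemma pvRun_absorb (l : List String) (a : String) (hl : ∀ x ∈ l, x = a)
    (rest : List String) (d : PySem.Dict String Int) (r : Int) :
    (l ++ rest).foldl pvStep (d, some a, r)
      = rest.foldl pvStep (d, some a, r + l.length) := by
  induction l generalizing r with
  | nil => simp
  | cons x l ih =>
      have hx : x = a := hl x (List.mem_cons_self ..)
      subst hx
      simp only [List.cons_append, List.foldl_cons, pvStep]
      rw [if_pos trivial]
      rw [ih (fun y hy => hl y (List.mem_cons_of_mem _ hy))]
      refine congrArg (fun z : Int => List.foldl pvStep (d, some x, z) rest) ?_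
      simp only [List.length_cons]
      push_cast
      ring

-- the head of the dropWhile remainder fails the predicate
lemma pvDropWhile_head (t : List String) (p : String → Bool) (b : String) (l : List String)
    (h : t.dropWhile p = b :: l) : p b = false := by
  induction t with
  | nil => simp at h
  | cons y ys ih =>
      rw [List.dropWhile_cons] at h
      by_cases hy : p y = true
      · rw [if_pos hy] at h; exact ih h
      · rw [if_neg hy] at h; cases h; simpa using hy

-- master lemma: the run-length scan over a sorted list computes every count
lemma pvRun_getD (n : Nat) :
    ∀ (s : List String), s.length ≤ n → s.Pairwise (· ≤ ·) →
    ∀ (d : PySem.Dict String Int) (prev : Option String) (r : Int) (k : String),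
    (∀ x ∈ s, prev ≠ some x) →
    (pvFlush (s.foldl pvStep (d, prev, r))).getD k 0
      = if prev = some k then r
        else if k ∈ s then (s.count k : Int) else d.getD k 0 := by
  induction n with
  | zero =>
      intro s hs _ d prev r k _
      have hnil : s = [] := List.eq_nil_of_length_eq_zero (Nat.le_zero.mp hs)
      subst hnil
      simp only [List.foldl_nil, List.not_mem_nil, if_false, pvFlush_getD]
  | succ n ih =>
      intro s hs hsort d prev r k hprev
      cases s with
      | nil => simp only [List.foldl_nil, List.not_mem_nil, if_false, pvFlush_getD]
      | cons a t =>
          have ht : t.length ≤ n := by simpa using hs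
          have hpa : ∀ x ∈ t, a ≤ x := (List.pairwise_cons.mp hsort).1
          have hpt : t.Pairwise (· ≤ ·) := (List.pairwise_cons.mp hsort).2
          have hpa' : prev ≠ some a := hprev a (List.mem_cons_self ..)
          have hstep : pvStep (d, prev, r) a = (pvFlush (d, prev, r), some a, 1) := by
            unfold pvStep pvFlush
            rw [if_neg (by simpa using hpa')]
          rw [List.foldl_cons, hstep]
          have htw : ∀ x ∈ t.takeWhile (fun y => y == a), x = a := by
            intro x hx
            have := List.mem_takeWhile_imp hx
            simpa using this
          have hsplit : t.takeWhile (fun y => y == a) ++ t.dropWhile (fun y => y == a) = t :=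
            List.takeWhile_append_dropWhile
          conv_lhs => rw [← hsplit, pvRun_absorb _ a htw _ _ 1]
          have hrl : (t.dropWhile (fun y => y == a)).length ≤ n :=
            le_trans (t.length_dropWhile_le _) ht
          have hrp : (t.dropWhile (fun y => y == a)).Pairwise (· ≤ ·) :=
            List.Pairwise.sublist (List.dropWhile_sublist _) hpt
          have hanr : a ∉ t.dropWhile (fun y => y == a) := by
            intro hmem
            cases hrest : t.dropWhile (fun y => y == a) with
            | nil => rw [hrest] at hmem; simp at hmem
            | cons b l =>
                have hb : (b == a) = false := pvDropWhile_head t _ b l hrest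
                have hbt : b ∈ t := (List.dropWhile_sublist _).subset (by
                  rw [hrest]; exact List.mem_cons_self ..)
                have hba : b ≠ a := by simpa using hb
                have hlt : a < b := lt_of_le_of_ne (hpa b hbt) (Ne.symm hba)
                rw [hrest] at hmem
                rcases List.mem_cons.mp hmem with hab | hal
                · exact absurd hab.symm hba
                · have hrp' : (b :: l).Pairwise (· ≤ ·) := hrest ▸ hrp
                  have : b ≤ a := (List.pairwise_cons.mp hrp').1 a hal
                  exact absurd (lt_of_lt_of_le hlt this) (lt_irrefl a)
          have hprev' : ∀ x ∈ t.dropWhile (fun y => y == a), (some a : Option String) ≠ some x := by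
            intro x hx h
            cases h
            exact hanr hx
          rw [ih _ hrl hrp _ _ _ k hprev']
          by_cases hk : k = a
          · subst hk
            have htc : List.count k t = (List.takeWhile (fun y => y == k) t).length := by
              conv_lhs => rw [← hsplit]
              rw [List.count_append,
                List.count_eq_length.mpr (fun b hb => (htw b hb).symm),
                List.count_eq_zero.mpr hanr]
              omega
            rw [if_pos rfl, if_neg hpa', if_pos (List.mem_cons_self ..),
              List.count_cons_self, htc]
            push_cast
            ring
          · rw [if_neg (by simpa using Ne.symm hk)]
            by_cases hkr : k ∈ t.dropWhile (fun y => y == a)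
            · have hkt : k ∈ t := (List.dropWhile_sublist _).subset hkr
              have htc2 : List.count k t
                  = List.count k (t.dropWhile (fun y => y == a)) := by
                conv_lhs => rw [← hsplit]
                rw [List.count_append,
                  List.count_eq_zero.mpr (fun hm => hk (htw k hm))]
                omega
              rw [if_pos hkr, if_neg (hprev k (List.mem_cons_of_mem _ hkt)),
                if_pos (List.mem_cons_of_mem _ hkt),
                List.count_cons_of_ne (Ne.symm hk), htc2]
            · have hknt : k ∉ t := by
                rw [← hsplit]
                intro hm
                rcases List.mem_append.mp hm with h1 | h2
                · exact hk (htw k h1)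
                · exact hkr h2
              have hmem : k ∉ a :: t := by
                intro hm
                rcases List.mem_cons.mp hm with h1 | h2
                · exact hk h1
                · exact hknt h2
              rw [if_neg hkr, pvFlush_getD, if_neg hmem]

-- B's run-length scan over sorted(lines) computes the count of every line of the list
lemma pvCountsB (L : List String) (k : String) (hk : k ∈ L) :
    (pvFlush ((PySem.List.sorted L (fun x => x) false).foldl pvStep
        (PySem.Dict.empty, none, 0))).getD k 0 = (L.count k : Int) := by
  have h := pvRun_getD (PySem.List.sorted L (fun x => x) false).length
    (PySem.List.sorted L (fun x => x) false) le_rfl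
    (PySem.List.sorted_pairwise L (fun x => x)) PySem.Dict.empty none 0 k
    (by intro x _ h; cases h)
  rw [h]
  have hmem : k ∈ PySem.List.sorted L (fun x => x) false :=
    (PySem.List.mem_sorted L (fun x => x) false k).mpr hk
  rw [if_neg (by intro h; cases h), if_pos hmem,
    (PySem.List.sorted_perm L (fun x => x) false).count_eq k]

-- ===== VERDICT (by name: the statement is the Claim_ definition above) =====
theorem find_repeated_lines_py_spec : Claim_equal_find_repeated_lines_py := by
  intro items _
  show find_repeated_lines_py items = find_repeated_lines_py_alt items
  unfold find_repeated_lines_py find_repeated_lines_py_alt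
  rw [pvCountsA, pvLinesB]
  simp only [List.nil_append]
  rw [← PySem.Dict.counter_eq_foldl]
  generalize pvL items = L
  set t : Int := max 2 ((items.length : Int) / 2) with ht
  have hfilt : L.filter (fun ln => decide (t ≤
        (pvFlush ((PySem.List.sorted L (fun x => x) false).foldl pvStep
          (PySem.Dict.empty, none, 0))).getD ln 0))
      = L.filter (fun ln => decide (t ≤ (L.count ln : Int))) := by
    refine List.filter_congr ?_
    intro ln hln
    rw [pvCountsB L ln hln]
  by_cases hnil : L = []
  · subst hnil
    rfl
  · refine Eq.trans ?_ (congrArg PySem.Set.ofList hfilt.symm)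
    have hitems : (PySem.Dict.counter L).items
        = (PySem.Set.ofList L).map (fun k => (k, (L.count k : Int))) :=
      PySem.Dict.items_counter L
    have hne : (PySem.Dict.counter L).items ≠ [] := by
      rw [hitems]
      intro h
      exact hnil ((pvOfList_eq_nil_iff L).mp (List.map_eq_nil_iff.mp h))
    rw [if_neg hne, hitems]
    rw [List.filter_map, List.map_map]
    have hcomp : ((fun p : String × Int => p.1) ∘ (fun k => (k, (L.count k : Int))))
        = fun k => k := rfl
    have hpred : ((fun p : String × Int => decide (t ≤ p.2)) ∘ (fun k => (k, (L.count k : Int))))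
        = fun ln => decide (t ≤ (L.count ln : Int)) := rfl
    rw [hcomp, hpred, List.map_id_fun']
    simp only [id_eq]
    rw [pvOfList_filter, PySem.Set.ofList_ofList]
    exact (pvOfList_filter _ L).symm
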